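-- pv_equiv track=rewrite | github.com/pypi-data/pypi-mirror-319 | packages/easyfig/easyfig-1.3.0-py3-none-any.whl/easyfig/main.py | order_types
-- ===== SOURCE A (Python) =====
-- def order_types(exp_names, values, reverse=True):
--     return_val = ""
--     # 获取排序后元素的索引 reverse=True默认降序
--     sorted_indices = sorted(range(len(values)), key=lambda x: values[x], reverse=reverse)
--     for _i, em in enumerate(sorted_indices):
--         if reverse:
--             if _i == 0:
--                 last_value = values[em]
--                 return_val += r"$" + exp_names[em][1:-1]
--             else:
--                 cur_value = values[em]
--                 if cur_value == last_value:
--                     return_val += r" = " + exp_names[em][1:-1]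
--                 else:
--                     return_val += r" > " + exp_names[em][1:-1]
--                 last_value = cur_value
--         else:
--             if _i == 0:
--                 last_value = values[em]
--                 return_val += r"$" + exp_names[em][1:-1]
--             else:
--                 cur_value = values[em]
--                 if cur_value == last_value:
--                     return_val += r" = " + exp_names[em][1:-1]
--                 else:
--                     return_val += r" < " + exp_names[em][1:-1]
--                 last_value = cur_value
--     return return_val + r"$", sorted_indices
-- ===== SOURCE B (Python) =====
-- def order_types(exp_names, values, reverse=True):
--     sorted_indices = sorted(range(len(values)), key=lambda x: values[x], reverse=reverse)
--     if not sorted_indices: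
--         return "$", sorted_indices
--     # group the sliced names by their value; dict insertion order = sorted order of values
--     groups = {}
--     for i in sorted_indices:
--         groups.setdefault(values[i], []).append(exp_names[i][1:-1])
--     op = " > " if reverse else " < "
--     chunks = [" = ".join(g) for g in groups.values()]
--     return "$" + op.join(chunks) + "$", sorted_indices
-- ===== Notes on version B (the rewrite author's own statement) =====
-- stated objective: alternative
-- what changed: Replaces A's running last_value comparison loop (with duplicated reverse branches) by a group-by: a dict from value to the list of sliced names, then ' = '-joining each group and op-joining the groups.
import Mathlib
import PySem

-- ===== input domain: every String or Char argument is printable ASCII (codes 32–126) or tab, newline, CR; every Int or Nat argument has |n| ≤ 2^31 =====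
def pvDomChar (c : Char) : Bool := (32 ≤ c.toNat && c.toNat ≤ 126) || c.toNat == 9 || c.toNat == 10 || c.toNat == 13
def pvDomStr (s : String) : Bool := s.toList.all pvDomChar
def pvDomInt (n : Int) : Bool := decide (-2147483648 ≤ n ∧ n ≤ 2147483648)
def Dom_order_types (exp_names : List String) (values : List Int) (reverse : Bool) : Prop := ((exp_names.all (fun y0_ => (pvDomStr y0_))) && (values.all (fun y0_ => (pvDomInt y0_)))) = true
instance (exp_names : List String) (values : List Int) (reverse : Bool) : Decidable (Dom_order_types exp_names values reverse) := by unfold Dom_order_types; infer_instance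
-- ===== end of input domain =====

-- B replaces A's running last_value comparison loop by grouping the sliced names into a
-- value-keyed dict and joining the groups (' = ' inside a group, the op between groups): simpler.

-- ===== PORT A =====
-- exp_names[em][1:-1], the same expression in both Pythons
def pvMid (exp_names : List String) (em : Int) : List Char :=
  PySem.List.slice (PySem.List.pyGetD exp_names em "").toList (some 1) (some (-1))

-- the body of A's for-loop over enumerate(sorted_indices); state = (return_val, last_value)
def pvStepA (exp_names : List String) (values : List Int) (reverse : Bool)
    (st : List Char × Int) (p : Int × Int) : List Char × Int :=
  let _i := p.1; let em := p.2
  if reverse then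
    if _i == 0 then
      (st.1 ++ '$' :: pvMid exp_names em, PySem.List.pyGetD values em 0)
    else
      let cur := PySem.List.pyGetD values em 0
      if cur == st.2 then (st.1 ++ " = ".toList ++ pvMid exp_names em, cur)
      else (st.1 ++ " > ".toList ++ pvMid exp_names em, cur)
  else
    if _i == 0 then
      (st.1 ++ '$' :: pvMid exp_names em, PySem.List.pyGetD values em 0)
    else
      let cur := PySem.List.pyGetD values em 0
      if cur == st.2 then (st.1 ++ " = ".toList ++ pvMid exp_names em, cur)
      else (st.1 ++ " < ".toList ++ pvMid exp_names em, cur)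

def order_types (exp_names : List String) (values : List Int) (reverse : Bool) : String × List Int :=
  let sorted_indices := PySem.List.sorted (PySem.List.pyRange 0 (values.length : Int) 1)
      (fun x => PySem.List.pyGetD values x 0) reverse
  let st := (PySem.List.enumerate sorted_indices).foldl (pvStepA exp_names values reverse) ([], 0)
  (String.ofList (st.1 ++ ['$']), sorted_indices)

-- ===== PORT B =====
def order_types_alt (exp_names : List String) (values : List Int) (reverse : Bool) : String × List Int :=
  let sorted_indices := PySem.List.sorted (PySem.List.pyRange 0 (values.length : Int) 1)
      (fun x => PySem.List.pyGetD values x 0) reverse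
  if sorted_indices.isEmpty then ("$", sorted_indices)
  else
    -- groups: value -> list of sliced names, in dict insertion order (= sorted order of values)
    let groups := sorted_indices.foldl
      (fun d i => d.modify (PySem.List.pyGetD values i 0) [] (fun g => g ++ [pvMid exp_names i]))
      PySem.Dict.empty
    let op := if reverse then " > ".toList else " < ".toList
    let chunks := groups.values.map (fun g => List.intercalate " = ".toList g)
    (String.ofList ('$' :: List.intercalate op chunks ++ ['$']), sorted_indices)

-- ===== PRECONDITION & SPEC =====
-- Pre_: exactly where the Python A returns — if values is longer than exp_names, some sorted index
-- reaches exp_names[em] out of range and A raises IndexError.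
def Pre_order_types (exp_names : List String) (values : List Int) (reverse : Bool) : Prop :=
  values.length ≤ exp_names.length
instance (exp_names : List String) (values : List Int) (reverse : Bool) : Decidable (Pre_order_types exp_names values reverse) := by unfold Pre_order_types; infer_instance
def pvWitness_order_types : List String × List Int × Bool := (["$a$", "$b$"], [1, 2], true)

def Spec_order_types (exp_names : List String) (values : List Int) (reverse : Bool) (out : String × List Int) : Prop := out = order_types_alt exp_names values reverse
instance (exp_names : List String) (values : List Int) (reverse : Bool) (out : String × List Int) : Decidable (Spec_order_types exp_names values reverse out) := by unfold Spec_order_types; infer_instance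

-- ===== CLAIM (what is proved, stated in full; the proofs are below) =====
def Claim_equal_order_types : Prop := ∀ (exp_names : List String) (values : List Int) (reverse : Bool), Dom_order_types exp_names values reverse → Pre_order_types exp_names values reverse → Spec_order_types exp_names values reverse (order_types exp_names values reverse)

-- ===== LEMMAS AND PROOFS =====

-- the (value, sliced name) pair an index contributes
def pvPair (exp_names : List String) (values : List Int) (i : Int) : Int × List Char :=
  (PySem.List.pyGetD values i 0, pvMid exp_names i)

-- spec of the text A's loop emits after the first element, over (value, name) pairs
def pvTailA (op : List Char) : Int → List (Int × List Char) → List Char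
  | _, [] => []
  | last, p :: t => (if p.1 == last then " = ".toList else op) ++ p.2 ++ pvTailA op p.1 t

-- spec of B's grouped body: dedup'd values in order, each group's names joined by " = "
def pvBody (op : List Char) (P : List (Int × List Char)) : List Char :=
  List.intercalate op ((PySem.List.dedup (P.map Prod.fst)).map
    (fun k => List.intercalate " = ".toList ((P.filter (fun p => p.1 == k)).map Prod.snd)))

-- A's fold over the enumerate tail (positions ≥ 1) appends exactly pvTailA
theorem pvStepA_tail (E : List String) (V : List Int) (r : Bool) (rest : List Int) :
    ∀ (s : Int), 1 ≤ s → ∀ (acc : List Char) (last : Int),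
    ((PySem.List.enumerate rest s).foldl (pvStepA E V r) (acc, last)).1
      = acc ++ pvTailA (if r then " > ".toList else " < ".toList) last (rest.map (pvPair E V)) := by
  induction rest with
  | nil => intro s hs acc last; simp [PySem.List.enumerate_nil, pvTailA]
  | cons i is ih =>
    intro s hs acc last
    rw [PySem.List.enumerate_cons, List.foldl_cons]
    have hz : (s == 0) = false := by simp; omega
    have step : pvStepA E V r (acc, last) (s, i)
        = (acc ++ (if PySem.List.pyGetD V i 0 == last then " = ".toList
                   else if r then " > ".toList else " < ".toList)
             ++ pvMid E i, PySem.List.pyGetD V i 0) := by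
      cases r <;> by_cases h : PySem.List.pyGetD V i 0 == last <;> simp [pvStepA, hz, h]
    rw [step, ih (s + 1) (by omega)]
    by_cases h : PySem.List.pyGetD V i 0 == last <;> simp [pvTailA, pvPair, h]

theorem pvIntercalate_cons (s x : List Char) (xs : List (List Char)) :
    List.intercalate s (x :: xs) = x ++ xs.flatMap (fun y => s ++ y) := by
  induction xs generalizing x with
  | nil => simp [List.intercalate]
  | cons y ys ih =>
    simp only [List.intercalate, List.intersperse] at *
    simp [List.flatten, ih]

theorem pvIntercalate_cons₂ (s x y : List Char) (ys : List (List Char)) :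
    List.intercalate s (x :: y :: ys) = x ++ s ++ List.intercalate s (y :: ys) := by
  rw [pvIntercalate_cons, pvIntercalate_cons]
  simp

-- a pure run of the current value emits " = " separators
theorem pvTailA_run (op : List Char) (k : Int) :
    ∀ (run rest' : List (Int × List Char)), (∀ p ∈ run, p.1 = k) →
    pvTailA op k (run ++ rest') = run.flatMap (fun p => " = ".toList ++ p.2) ++ pvTailA op k rest' := by
  intro run
  induction run with
  | nil => intro rest' _; simp
  | cons p ps ih =>
    intro rest' h
    have hp : p.1 = k := h p (by simp)
    simp [pvTailA, hp, ih rest' (fun q hq => h q (by simp [hq]))]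

theorem pvFoldAdd_mem (l : List Int) : ∀ (s : PySem.Set Int), (∀ x ∈ l, x ∈ s) →
    l.foldl PySem.Set.add s = s := by
  induction l with
  | nil => intro s _; rfl
  | cons x xs ih =>
    intro s h
    have hx : PySem.Set.add s x = s := by
      simp [PySem.Set.add, PySem.Set.contains, h x (by simp)]
    rw [List.foldl_cons, hx]
    exact ih s (fun y hy => h y (by simp [hy]))

theorem pvFoldAdd_cons (k : Int) (l : List Int) : ∀ (s : List Int), k ∉ l →
    l.foldl PySem.Set.add (k :: s) = k :: l.foldl PySem.Set.add s := by
  induction l with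
  | nil => intro s _; rfl
  | cons x xs ih =>
    intro s hk
    have hxk : ¬ (x = k) := by rintro rfl; exact hk (by simp)
    have : PySem.Set.add (k :: s) x = k :: PySem.Set.add s x := by
      simp only [PySem.Set.add, PySem.Set.contains]
      by_cases h : x ∈ s <;> simp [h, hxk]
    rw [List.foldl_cons, this, List.foldl_cons]
    exact ih _ (fun hmem => hk (by simp [hmem]))

theorem pvDedup_shift (k0 : Int) (l1 l2 : List Int) (h1 : ∀ x ∈ l1, x = k0) (h2 : k0 ∉ l2) :
    PySem.List.dedup (k0 :: (l1 ++ l2)) = k0 :: PySem.List.dedup l2 := by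
  show (k0 :: (l1 ++ l2)).foldl PySem.Set.add [] = k0 :: l2.foldl PySem.Set.add []
  rw [List.foldl_cons, List.foldl_append]
  have h0 : PySem.Set.add ([] : PySem.Set Int) k0 = [k0] := rfl
  rw [h0, pvFoldAdd_mem l1 [k0] (fun x hx => by simp [h1 x hx]), pvFoldAdd_cons k0 l2 [] h2]

-- the heart: on a run-clustered pair list, A's running comparison = B's grouped body
theorem pvMain (op : List Char) (r : Int → Int → Prop)
    (habs : ∀ a b c, r a b → a ≠ b → r b c → a ≠ c) :
    ∀ (n : Nat) (rest : List (Int × List Char)) (k0 : Int) (n0 : List Char), rest.length ≤ n →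
    ((k0, n0) :: rest).Pairwise (fun a b => r a.1 b.1) →
    n0 ++ pvTailA op k0 rest = pvBody op ((k0, n0) :: rest) := by
  intro n
  induction n with
  | zero =>
    intro rest k0 n0 hlen _
    have hrest : rest = [] := List.eq_nil_of_length_eq_zero (Nat.le_zero.mp hlen)
    subst hrest
    have hd : PySem.List.dedup (((k0, n0) :: ([] : List (Int × List Char))).map Prod.fst) = [k0] := by
      simpa using pvDedup_shift k0 [] [] (by simp) (by simp)
    simp only [pvBody]
    rw [hd, List.map_cons, List.map_nil]
    rw [pvIntercalate_cons]
    simp [pvTailA, pvIntercalate_cons]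
  | succ m ih =>
    intro rest k0 n0 hlen hpw
    have hsplit := List.takeWhile_append_dropWhile (p := fun p : Int × List Char => p.1 == k0) (l := rest)
    have hrun : ∀ p ∈ rest.takeWhile (fun p : Int × List Char => p.1 == k0), p.1 = k0 :=
      fun p hp => by simpa using List.mem_takeWhile_imp hp
    obtain ⟨hk0all, hpw_rest⟩ := List.pairwise_cons.mp hpw
    cases hdrop : rest.dropWhile (fun p : Int × List Char => p.1 == k0) with
    | nil =>
      have hrest : rest = rest.takeWhile (fun p : Int × List Char => p.1 == k0) := by
        have h1 := hsplit
        rw [hdrop, List.append_nil] at h1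
        exact h1.symm
      have hall : ∀ p ∈ rest, p.1 = k0 := by
        intro p hp
        have hp' : p ∈ rest.takeWhile (fun p : Int × List Char => p.1 == k0)
            ++ rest.dropWhile (fun p : Int × List Char => p.1 == k0) := by rw [hsplit]; exact hp
        rw [hdrop, List.append_nil] at hp'
        exact hrun p hp' 
      have hd : PySem.List.dedup (((k0, n0) :: rest).map Prod.fst) = [k0] := by
        have := pvDedup_shift k0 (rest.map Prod.fst) [] (fun x hx => by
          obtain ⟨p, hp, rfl⟩ := List.mem_map.mp hx; exact hall p hp) (by simp)
        simpa using this
      have hfilt : ((k0, n0) :: rest).filter (fun p => p.1 == k0) = (k0, n0) :: rest := by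
        apply List.filter_eq_self.mpr
        intro p hp
        rcases List.mem_cons.mp hp with rfl | hp'
        · simp
        · simp [hall p hp']
      have htail : pvTailA op k0 rest = rest.flatMap (fun p => " = ".toList ++ p.2) := by
        have := pvTailA_run op k0 rest [] (fun p hp => hall p hp)
        simpa [pvTailA] using this
      rw [htail]
      simp only [pvBody]
      rw [hd, List.map_cons, List.map_nil, hfilt, List.map_cons]
      rw [pvIntercalate_cons, pvIntercalate_cons]
      simp [List.flatMap_def, Function.comp_def]
    | cons q t =>
      obtain ⟨qk, qn⟩ := q
      have hrest : rest = rest.takeWhile (fun p : Int × List Char => p.1 == k0) ++ (qk, qn) :: t := by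
        have h1 := hsplit
        rw [hdrop] at h1
        exact h1.symm
      have hqb : ((qk : Int) == k0) = false := by
        have := List.head?_dropWhile_not (fun p : Int × List Char => p.1 == k0) rest
        rw [hdrop] at this; simpa using this
      have hqk : qk ≠ k0 := by simpa using hqb
      have hpw2 : (((qk, qn) : Int × List Char) :: t).Pairwise (fun a b => r a.1 b.1) := by
        refine List.Pairwise.sublist ?_ hpw_rest
        rw [hrest]
        exact List.sublist_append_right _ _
      obtain ⟨hq_t, hpw_t⟩ := List.pairwise_cons.mp hpw2
      have hmemq : ((qk, qn) : Int × List Char) ∈ rest := by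
        rw [hrest]
        exact List.mem_append_right _ (by simp)
      have hall : ∀ p ∈ ((qk, qn) : Int × List Char) :: t, p.1 ≠ k0 := by
        intro p hp
        rcases List.mem_cons.mp hp with rfl | hpt
        · exact hqk
        · have h1 : r k0 qk := hk0all _ hmemq
          have h2 : r qk p.1 := hq_t p hpt
          exact fun he => (habs k0 qk p.1 h1 (Ne.symm hqk) h2) he.symm
      have hlen' : t.length ≤ m := by
        have := congrArg List.length hrest
        simp at this
        omega
      have hIH := ih t qk qn hlen' hpw2
      have hL : pvTailA op k0 rest
          = (rest.takeWhile (fun p : Int × List Char => p.1 == k0)).flatMap (fun p => " = ".toList ++ p.2)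
            ++ (op ++ (qn ++ pvTailA op qk t)) := by
        conv_lhs => rw [hrest]
        rw [pvTailA_run op k0 _ _ hrun]
        simp [pvTailA, hqb]
      have hd : PySem.List.dedup (((k0, n0) :: rest).map Prod.fst)
          = k0 :: PySem.List.dedup (qk :: t.map Prod.fst) := by
        conv_lhs => rw [hrest]
        have := pvDedup_shift k0
          ((rest.takeWhile (fun p : Int × List Char => p.1 == k0)).map Prod.fst)
          (qk :: t.map Prod.fst)
          (fun x hx => by
            obtain ⟨p, hp, hpe⟩ := List.mem_map.mp hx
            rw [← hpe]; exact hrun p hp)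
          (by
            intro hmem
            rcases List.mem_cons.mp hmem with he | hx
            · exact hqk he.symm
            · obtain ⟨p, hp, hpe⟩ := List.mem_map.mp hx
              exact hall p (List.mem_cons_of_mem _ hp) hpe)
        simpa using this
      have hfilt0 : ((k0, n0) :: rest).filter (fun p => p.1 == k0)
          = (k0, n0) :: rest.takeWhile (fun p : Int × List Char => p.1 == k0) := by
        conv_lhs => rw [hrest]
        rw [List.filter_cons, List.filter_append]
        rw [List.filter_eq_self.mpr (fun p hp => by simp [hrun p hp])]
        rw [List.filter_eq_nil_iff.mpr (fun p hp => by simp [hall p hp])]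
        simp
      have hchunks : ∀ k ∈ PySem.List.dedup (qk :: t.map Prod.fst),
          ((k0, n0) :: rest).filter (fun p => p.1 == k)
            = (((qk, qn) : Int × List Char) :: t).filter (fun p => p.1 == k) := by
        intro k hk
        have hkne : k ≠ k0 := by
          have hk' : k ∈ qk :: t.map Prod.fst := (PySem.List.mem_dedup _ _).mp hk
          rcases List.mem_cons.mp hk' with rfl | hx
          · exact hqk
          · obtain ⟨p, hp, hpe⟩ := List.mem_map.mp hx
            rw [← hpe]
            exact hall p (List.mem_cons_of_mem _ hp)
        conv_lhs => rw [hrest]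
        rw [List.filter_cons, List.filter_append]
        rw [List.filter_eq_nil_iff.mpr (fun p hp => by simp [hrun p hp, Ne.symm hkne])]
        simp [Ne.symm hkne]
      have hIH' : qn ++ pvTailA op qk t
          = List.intercalate op ((PySem.List.dedup (qk :: t.map Prod.fst)).map
              (fun k => List.intercalate " = ".toList
                (((((qk, qn) : Int × List Char) :: t).filter (fun p => p.1 == k)).map Prod.snd))) := by
        rw [hIH]
        simp [pvBody]
      have hmapc : (PySem.List.dedup (qk :: t.map Prod.fst)).map
            (fun k => List.intercalate " = ".toList
              ((((k0, n0) :: rest).filter (fun p => p.1 == k)).map Prod.snd))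
          = (PySem.List.dedup (qk :: t.map Prod.fst)).map
            (fun k => List.intercalate " = ".toList
              (((((qk, qn) : Int × List Char) :: t).filter (fun p => p.1 == k)).map Prod.snd)) :=
        List.map_congr_left (fun k hk => by rw [hchunks k hk])
      obtain ⟨y, ys, hys⟩ := List.exists_cons_of_ne_nil
        (List.ne_nil_of_mem ((PySem.List.mem_dedup _ _).mpr (by simp : qk ∈ qk :: t.map Prod.fst)))
      rw [hL]
      simp only [pvBody]
      rw [hd]
      simp only [List.map_cons]
      rw [hfilt0, hmapc]
      rw [hys] at hIH' ⊢
      simp only [List.map_cons] at hIH' ⊢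
      rw [pvIntercalate_cons₂, ← hIH']
      rw [pvIntercalate_cons]
      simp [List.flatMap_def, Function.comp_def, List.append_assoc]

theorem order_types_eq_alt (E : List String) (V : List Int) (r : Bool) :
    order_types E V r = order_types_alt E V r := by
  obtain ⟨rel, habs, hpw⟩ :
      ∃ rel : Int → Int → Prop, (∀ a b c, rel a b → a ≠ b → rel b c → a ≠ c) ∧
        ((PySem.List.sorted (PySem.List.pyRange 0 (V.length : Int) 1)
          (fun x => PySem.List.pyGetD V x 0) r).map (pvPair E V)).Pairwise
            (fun a b => rel a.1 b.1) := by
    cases r with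
    | false =>
      exact ⟨(· ≤ ·), fun a b c h1 h2 h3 => by omega,
        List.pairwise_map.mpr (PySem.List.sorted_pairwise _ _)⟩
    | true =>
      exact ⟨fun a b => b ≤ a, fun a b c h1 h2 h3 => by omega,
        List.pairwise_map.mpr (PySem.List.sorted_pairwise_rev _ _)⟩
  simp only [order_types, order_types_alt]
  generalize hidx : PySem.List.sorted (PySem.List.pyRange 0 (V.length : Int) 1)
      (fun x => PySem.List.pyGetD V x 0) r = idx at hpw ⊢
  cases idx with
  | nil => simp [PySem.List.enumerate_nil]
  | cons e0 rest =>
    -- A side: peel the first iteration, the rest is pvTailA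
    rw [PySem.List.enumerate_cons, List.foldl_cons]
    have step0 : pvStepA E V r (([] : List Char), (0 : Int)) ((0 : Int), e0)
        = ('$' :: pvMid E e0, PySem.List.pyGetD V e0 0) := by
      cases r <;> rfl
    rw [step0, show (0 : Int) + 1 = 1 from rfl, pvStepA_tail E V r rest 1 (by omega)]
    -- B side: the grouping dict fold, seen over (value, name) pairs
    have hfold : (e0 :: rest).foldl
        (fun d i => d.modify (PySem.List.pyGetD V i 0) [] (fun g => g ++ [pvMid E i]))
        PySem.Dict.empty
        = ((e0 :: rest).map (pvPair E V)).foldl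
            (fun d p => d.modify p.1 [] (fun g => g ++ [p.2])) PySem.Dict.empty := by
      rw [List.foldl_map]
      simp [pvPair]
    -- keys / nodup / values / getD of the grouping dict
    have hnodup : (((e0 :: rest).map (pvPair E V)).foldl
        (fun d p => d.modify p.1 [] (fun g => g ++ [p.2])) PySem.Dict.empty).keys.Nodup := by
      exact PySem.Dict.nodup_keys_foldl_modify_key _ _ _ _ _ (by simp)
    have hkeys : (((e0 :: rest).map (pvPair E V)).foldl
        (fun d p => d.modify p.1 [] (fun g => g ++ [p.2])) PySem.Dict.empty).keys
        = PySem.List.dedup (((e0 :: rest).map (pvPair E V)).map Prod.fst) := by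
      rw [PySem.Dict.keys_foldl_modify_key]
      simp [PySem.Set.update, PySem.Set.ofList]
    have hgetD : ∀ k, (((e0 :: rest).map (pvPair E V)).foldl
        (fun d p => d.modify p.1 [] (fun g => g ++ [p.2])) PySem.Dict.empty).getD k []
        = ((((e0 :: rest).map (pvPair E V)).filter (fun p => p.1 == k)).map Prod.snd) := by
      intro k
      rw [PySem.Dict.getD_foldl_modify_append]
      simp
    have hvals : (((e0 :: rest).map (pvPair E V)).foldl
        (fun d p => d.modify p.1 [] (fun g => g ++ [p.2])) PySem.Dict.empty).values.map
          (fun g => List.intercalate " = ".toList g)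
        = (PySem.List.dedup (((e0 :: rest).map (pvPair E V)).map Prod.fst)).map
            (fun k => List.intercalate " = ".toList
              ((((e0 :: rest).map (pvPair E V)).filter (fun p => p.1 == k)).map Prod.snd)) := by
      rw [PySem.Dict.values_eq_map_keys _ hnodup [], hkeys, List.map_map]
      exact List.map_congr_left (fun k _ => by simp only [Function.comp_apply, hgetD])
    have hmain := pvMain (if r then " > ".toList else " < ".toList) rel habs
      (rest.map (pvPair E V)).length (rest.map (pvPair E V))
      (PySem.List.pyGetD V e0 0) (pvMid E e0) (le_refl _) (by simpa [pvPair] using hpw)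
    rw [if_neg (by simp : ¬((e0 :: rest).isEmpty = true))]
    rw [hfold, hvals]
    simp only [pvBody, List.map_cons] at hmain
    simp only [List.map_cons, pvPair]
    rw [← hmain]
    simp

-- ===== VERDICT (by name: the statement is the Claim_ definition above) =====
theorem order_types_spec : Claim_equal_order_types := by
  intro E V r _ _
  exact order_types_eq_alt E V r
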